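-- pv_equiv track=rewrite | github.com/zy2424/columbia_class | HW3.py | question_30
-- ===== SOURCE A (Python) =====
-- def question_30(n):
--     F = []
--     for i in range (0,n):
--         powerlist = []
--         for x in range (1,i+1):
--             powerlist.append(x)
--         power = sum(powerlist)
--         twotothepower = 2**power
--         F.append(twotothepower)
--     return F
-- ===== SOURCE B (Python) =====
-- def question_30(n):
--     F = []
--     val = 1
--     for i in range(n):
--         F.append(val)
--         val *= 2 ** (i + 1)
--     return F
-- ===== Notes on version B (the rewrite author's own statement) =====
-- stated objective: faster
-- what changed: Replaces the per-iteration rebuild of [1..i], its summation and a from-scratch exponentiation 2**T(i) by a single pass maintaining a running product via the recurrence 2^T(i) = 2^T(i-1) * 2^i.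
import Mathlib
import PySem

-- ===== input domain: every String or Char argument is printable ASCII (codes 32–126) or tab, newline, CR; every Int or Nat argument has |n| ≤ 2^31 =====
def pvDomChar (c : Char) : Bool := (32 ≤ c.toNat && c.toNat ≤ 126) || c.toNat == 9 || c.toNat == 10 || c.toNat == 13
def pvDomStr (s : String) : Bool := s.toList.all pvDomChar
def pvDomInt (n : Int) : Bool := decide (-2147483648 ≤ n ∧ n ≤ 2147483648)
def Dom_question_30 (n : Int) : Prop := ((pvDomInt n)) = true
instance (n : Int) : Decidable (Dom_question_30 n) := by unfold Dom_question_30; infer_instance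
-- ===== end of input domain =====

-- B maintains the powers with one running product (2^T(i) = 2^T(i-1) * 2^i) in a single pass,
-- instead of A's rebuilding and summing [1..i] and exponentiating from scratch each iteration.

-- ===== PORT A =====
def question_30 (n : Int) : List Int :=
  (PySem.List.pyRange 0 n 1).foldl (fun F i =>
    let powerlist := (PySem.List.pyRange 1 (i + 1) 1).foldl (fun acc x => acc ++ [x]) []
    let power := powerlist.sum
    let twotothepower : Int := 2 ^ power.toNat
    F ++ [twotothepower]) []

-- ===== PORT B =====
def question_30_alt (n : Int) : List Int :=
  ((PySem.List.pyRange 0 n 1).foldl (fun (s : List Int × Int) i =>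
    (s.1 ++ [s.2], s.2 * 2 ^ (i + 1).toNat)) ([], 1)).1

-- ===== PRECONDITION & SPEC =====
def Spec_question_30 (n : Int) (out : List Int) : Prop := out = question_30_alt n
instance (n : Int) (out : List Int) : Decidable (Spec_question_30 n out) := by unfold Spec_question_30; infer_instance

-- ===== CLAIM (what is proved, stated in full; the proofs are below) =====
def Claim_equal_question_30 : Prop := ∀ (n : Int), Dom_question_30 n → Spec_question_30 n (question_30 n)

-- ===== LEMMAS AND PROOFS =====

-- triangular number T m = 0 + 1 + … + m
def pvTri : Nat → Nat
  | 0 => 0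
  | m + 1 => pvTri m + (m + 1)

theorem pv_foldl_app (l acc : List Int) :
    l.foldl (fun a x => a ++ [x]) acc = acc ++ l := by
  induction l generalizing acc with
  | nil => simp
  | cons h t ih => simp [List.foldl, ih]

theorem pv_sum_range (m : Nat) :
    (PySem.List.pyRange 1 ((m : Int) + 1) 1).sum = (pvTri m : Int) := by
  induction m with
  | zero => simp [PySem.List.pyRange_one_eq_nil, pvTri]
  | succ k ih =>
      have h1 : (1 : Int) ≤ (k : Int) + 1 := by omega
      have := PySem.List.pyRange_one_succ_right h1
      push_cast
      push_cast at ih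
      rw [show ((k : Int) + 1 + 1) = ((k : Int) + 1) + 1 by ring, this]
      simp [pvTri, ih]

theorem pv_main (m : Nat) :
    question_30 (m : Int) =
      ((PySem.List.pyRange 0 (m : Int) 1).foldl (fun (s : List Int × Int) i =>
        (s.1 ++ [s.2], s.2 * 2 ^ (i + 1).toNat)) ([], 1)).1 ∧
    ((PySem.List.pyRange 0 (m : Int) 1).foldl (fun (s : List Int × Int) i =>
        (s.1 ++ [s.2], s.2 * 2 ^ (i + 1).toNat)) ([], 1)).2 = 2 ^ pvTri m := by
  induction m with
  | zero => simp [question_30, PySem.List.pyRange_one_eq_nil, pvTri]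
  | succ k ih =>
      have h0 : (0 : Int) ≤ (k : Int) := by omega
      have hsplit := PySem.List.pyRange_one_succ_right h0
      obtain ⟨ih1, ih2⟩ := ih
      constructor
      · rw [question_30]
        push_cast
        rw [show ((k : Int) + 1) = (k : Int) + 1 by ring, hsplit]
        rw [List.foldl_append, List.foldl_append]
        simp only [List.foldl]
        rw [question_30] at ih1
        rw [ih1, ih2, pv_foldl_app]
        simp only [List.nil_append]
        rw [pv_sum_range k]
        simp
      · push_cast
        rw [hsplit, List.foldl_append]
        simp only [List.foldl]
        rw [ih2]
        have : (((k : Int)) + 1).toNat = k + 1 := by omega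
        rw [this, ← pow_add]
        simp [pvTri]

theorem pv_range_nonneg (n : Int) :
    PySem.List.pyRange 0 n 1 = PySem.List.pyRange 0 ((n.toNat : Int)) 1 := by
  rw [PySem.List.pyRange_one, PySem.List.pyRange_one]
  have h : (n - 0).toNat = ((n.toNat : Int) - 0).toNat := by omega
  rw [h]

-- ===== VERDICT (by name: the statement is the Claim_ definition above) =====
theorem question_30_spec : Claim_equal_question_30 := by
  intro n _
  unfold Spec_question_30 question_30_alt
  rw [show question_30 n = question_30 ((n.toNat : Int)) by
        unfold question_30; rw [pv_range_nonneg],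
      pv_range_nonneg]
  exact (pv_main n.toNat).1
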